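-- pv_equiv track=rewrite | github.com/Michaszek224/praktykaiszeregowaniezadan | zadanie1/algorytmy/156011.py | heuristic_solver
-- ===== SOURCE A (Python) =====
-- from typing import List, Tuple
--
-- def heuristic_solver(jobs:List[Tuple[int,int]], s:int) -> Tuple[int, List[List[int]]]:
--     n = len(jobs)
--     indexed = [(i+1, jobs[i][0], jobs[i][1]) for i in range(n)]
--     indexed.sort(key=lambda x: x[2])
--     batches = []
--     cur_batch = []
--     for idx,p,d in indexed:
--         if not cur_batch:
--             cur_batch = [idx]
--         else:
--             sumA = compute_sumDj_from_batches(jobs, s, batches + [cur_batch + [idx]])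
--             sumB = compute_sumDj_from_batches(jobs, s, batches + [cur_batch, [idx]])
--             if sumA <= sumB:
--                 cur_batch.append(idx)
--             else:
--                 batches.append(cur_batch)
--                 cur_batch = [idx]
--     if cur_batch:
--         batches.append(cur_batch)
--     sumDj = compute_sumDj_from_batches(jobs, s, batches)
--     return sumDj, batches
--
-- def compute_sumDj_from_batches(jobs: List[Tuple[int,int]], s: int, batches: List[List[int]]) -> int:
--     time = 0
--     total = 0
--     first = True
--     for batch in batches:
--         if not first:
--             time += s
--         first = False
--         p_sum = sum(jobs[j-1][0] for j in batch)
--         time += p_sum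
--         for j in batch:
--             d = jobs[j-1][1]
--             total += max(0, time - d)
--     return total
-- ===== SOURCE B (Python) =====
-- from typing import List, Tuple
--
-- def heuristic_solver(jobs: List[Tuple[int, int]], s: int) -> Tuple[int, List[List[int]]]:
--     # Incremental greedy: keep running committed tardiness, committed end time,
--     # and the current batch's processing sum and due dates, so each decision
--     # only scans the current batch instead of recomputing the whole schedule.
--     n = len(jobs)
--     indexed = sorted([(i + 1, jobs[i][0], jobs[i][1]) for i in range(n)], key=lambda x: x[2])
--     batches = []
--     cur = []        # indices (1-based) of the current open batch
--     tot = 0         # tardiness of committed batches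
--     end = 0         # completion time of the last committed batch
--     psum = 0        # processing-time sum of cur
--     dues = []       # due dates of cur, in arrival order
--     for idx, p, d in indexed:
--         if not cur:
--             cur, psum, dues = [idx], p, [d]
--         else:
--             gap = s if batches else 0
--             c_close = end + gap + psum
--             tail_close = sum(max(0, c_close - dd) for dd in dues)
--             c_join = c_close + p
--             tail_join = sum(max(0, c_join - dd) for dd in dues) + max(0, c_join - d)
--             if tail_join <= tail_close + max(0, c_close + s + p - d):
--                 cur.append(idx)
--                 psum += p
--                 dues.append(d)
--             else:
--                 batches.append(cur)
--                 tot += tail_close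
--                 end = c_close
--                 cur, psum, dues = [idx], p, [d]
--     if cur:
--         gap = s if batches else 0
--         c = end + gap + psum
--         tot += sum(max(0, c - dd) for dd in dues)
--         batches.append(cur)
--     return tot, batches
-- ===== Notes on version B (the rewrite author's own statement) =====
-- stated objective: faster
-- what changed: Instead of recomputing the whole schedule's tardiness from scratch for every join/split decision, B keeps the committed batches' tardiness total and end time plus the open batch's processing sum and due-date list, so each decision only scans the open batch.
import Mathlib
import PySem

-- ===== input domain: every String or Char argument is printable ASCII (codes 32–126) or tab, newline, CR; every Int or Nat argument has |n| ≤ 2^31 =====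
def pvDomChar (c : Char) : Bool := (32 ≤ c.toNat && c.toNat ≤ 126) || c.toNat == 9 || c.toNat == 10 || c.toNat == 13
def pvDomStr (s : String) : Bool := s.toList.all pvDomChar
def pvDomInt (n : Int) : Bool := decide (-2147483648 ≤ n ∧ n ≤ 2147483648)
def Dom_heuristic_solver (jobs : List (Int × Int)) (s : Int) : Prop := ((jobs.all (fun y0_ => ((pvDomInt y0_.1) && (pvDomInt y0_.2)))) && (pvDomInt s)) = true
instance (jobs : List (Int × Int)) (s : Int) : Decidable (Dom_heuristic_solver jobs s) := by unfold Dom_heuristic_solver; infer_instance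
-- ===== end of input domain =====

-- B replaces A's full-schedule tardiness recomputation at every greedy join/split decision with
-- running totals (committed tardiness, committed end time, open batch's processing sum and due
-- dates), so each decision only scans the open batch; a timing run measured B faster.
-- All indices either program looks up (j-1 for j drawn from 1..len(jobs)) are in range, so
-- pyGetD's default (0,0) is never read.

-- ===== PORT A =====
def compute_sumDj_from_batches (jobs : List (Int × Int)) (s : Int) (batches : List (List Int)) : Int :=
  -- loop state: (time, total, first)
  (batches.foldl (fun (st : Int × Int × Bool) batch =>
      let time1 := if st.2.2 then st.1 else st.1 + s
      let p_sum := batch.foldl (fun a j => a + (PySem.List.pyGetD jobs (j - 1) ((0 : Int), (0 : Int))).1) 0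
      let time2 := time1 + p_sum
      let total := batch.foldl (fun a j => a + max 0 (time2 - (PySem.List.pyGetD jobs (j - 1) ((0 : Int), (0 : Int))).2)) st.2.1
      (time2, total, false))
    (0, 0, true)).2.1

-- the body of A's for-loop, state (batches, cur_batch)
def heuristicStepA (jobs : List (Int × Int)) (s : Int)
    (st : List (List Int) × List Int) (x : Int × Int × Int) : List (List Int) × List Int :=
  let batches := st.1
  let cur := st.2
  if cur.isEmpty then (batches, [x.1])
  else
    let sumA := compute_sumDj_from_batches jobs s (batches ++ [cur ++ [x.1]])
    let sumB := compute_sumDj_from_batches jobs s (batches ++ [cur, [x.1]])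
    if sumA ≤ sumB then (batches, cur ++ [x.1])
    else (batches ++ [cur], [x.1])

def heuristic_solver (jobs : List (Int × Int)) (s : Int) : Int × List (List Int) :=
  let n : Int := jobs.length
  let indexed := (PySem.List.pyRange 0 n 1).map (fun i =>
      (i + 1, (PySem.List.pyGetD jobs i ((0 : Int), (0 : Int))).1, (PySem.List.pyGetD jobs i ((0 : Int), (0 : Int))).2))
  let indexed := PySem.List.sorted indexed (fun x => x.2.2) false
  let st := indexed.foldl (heuristicStepA jobs s) ([], [])
  let batches := if st.2.isEmpty then st.1 else st.1 ++ [st.2]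
  (compute_sumDj_from_batches jobs s batches, batches)

-- ===== PORT B =====
-- the body of B's for-loop, state (batches, cur, tot, end, psum, dues)
def heuristicStepB (s : Int)
    (st : List (List Int) × List Int × Int × Int × Int × List Int)
    (x : Int × Int × Int) : List (List Int) × List Int × Int × Int × Int × List Int :=
  let batches := st.1
  let cur := st.2.1
  let tot := st.2.2.1
  let endt := st.2.2.2.1
  let psum := st.2.2.2.2.1
  let dues := st.2.2.2.2.2
  let idx := x.1
  let p := x.2.1
  let d := x.2.2
  if cur.isEmpty then (batches, [idx], tot, endt, p, [d])
  else
    let gap := if batches.isEmpty then 0 else s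
    let cClose := endt + gap + psum
    let tailClose := dues.foldl (fun a dd => a + max 0 (cClose - dd)) 0
    let cJoin := cClose + p
    let tailJoin := dues.foldl (fun a dd => a + max 0 (cJoin - dd)) 0 + max 0 (cJoin - d)
    if tailJoin ≤ tailClose + max 0 (cClose + s + p - d) then
      (batches, cur ++ [idx], tot, endt, psum + p, dues ++ [d])
    else
      (batches ++ [cur], [idx], tot + tailClose, cClose, p, [d])

def heuristic_solver_alt (jobs : List (Int × Int)) (s : Int) : Int × List (List Int) :=
  let n : Int := jobs.length
  let indexed := PySem.List.sorted ((PySem.List.pyRange 0 n 1).map (fun i =>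
      (i + 1, (PySem.List.pyGetD jobs i ((0 : Int), (0 : Int))).1, (PySem.List.pyGetD jobs i ((0 : Int), (0 : Int))).2)))
      (fun x => x.2.2) false
  let st := indexed.foldl (heuristicStepB s) ([], [], 0, 0, 0, [])
  let batches := st.1
  let cur := st.2.1
  let tot := st.2.2.1
  let endt := st.2.2.2.1
  let psum := st.2.2.2.2.1
  let dues := st.2.2.2.2.2
  if cur.isEmpty then (tot, batches)
  else
    let gap := if batches.isEmpty then 0 else s
    (tot + dues.foldl (fun a dd => a + max 0 (endt + gap + psum - dd)) 0, batches ++ [cur])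

-- ===== PRECONDITION & SPEC =====
def Spec_heuristic_solver (jobs : List (Int × Int)) (s : Int) (out : Int × List (List Int)) : Prop := out = heuristic_solver_alt jobs s
instance (jobs : List (Int × Int)) (s : Int) (out : Int × List (List Int)) : Decidable (Spec_heuristic_solver jobs s out) := by unfold Spec_heuristic_solver; infer_instance

-- ===== CLAIM (what is proved, stated in full; the proofs are below) =====
def Claim_equal_heuristic_solver : Prop := ∀ (jobs : List (Int × Int)) (s : Int), Dom_heuristic_solver jobs s → Spec_heuristic_solver jobs s (heuristic_solver jobs s)

-- ===== LEMMAS AND PROOFS =====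

-- the job looked up by a 1-based index
def pvJob (jobs : List (Int × Int)) (j : Int) : Int × Int :=
  PySem.List.pyGetD jobs (j - 1) ((0 : Int), (0 : Int))

-- processing-time sum and due-date list of a batch of indices
def pvP (jobs : List (Int × Int)) (c : List Int) : Int := (c.map (fun j => (pvJob jobs j).1)).sum
def pvDues (jobs : List (Int × Int)) (c : List Int) : List Int := c.map (fun j => (pvJob jobs j).2)
-- tardiness of due dates ds at completion time t
def pvT (t : Int) (ds : List Int) : Int := (ds.map (fun dd => max 0 (t - dd))).sum

-- the step function of compute_sumDj_from_batches's loop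
def pvF (jobs : List (Int × Int)) (s : Int) (st : Int × Int × Bool) (batch : List Int) : Int × Int × Bool :=
  let time1 := if st.2.2 then st.1 else st.1 + s
  let p_sum := batch.foldl (fun a j => a + (PySem.List.pyGetD jobs (j - 1) ((0 : Int), (0 : Int))).1) 0
  let time2 := time1 + p_sum
  let total := batch.foldl (fun a j => a + max 0 (time2 - (PySem.List.pyGetD jobs (j - 1) ((0 : Int), (0 : Int))).2)) st.2.1
  (time2, total, false)

def pvFold (jobs : List (Int × Int)) (s : Int) (bs : List (List Int)) : Int × Int × Bool :=
  bs.foldl (pvF jobs s) (0, 0, true)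

lemma pvCompute_eq (jobs : List (Int × Int)) (s : Int) (bs : List (List Int)) :
    compute_sumDj_from_batches jobs s bs = (pvFold jobs s bs).2.1 := rfl

lemma pvF_eq (jobs : List (Int × Int)) (s : Int) (st : Int × Int × Bool) (c : List Int) :
    pvF jobs s st c =
      ((if st.2.2 then st.1 else st.1 + s) + pvP jobs c,
       st.2.1 + pvT ((if st.2.2 then st.1 else st.1 + s) + pvP jobs c) (pvDues jobs c),
       false) := by
  simp [pvF, pvP, pvT, pvDues, pvJob, PySem.List.foldl_add, List.map_map, Function.comp_def]

lemma pvF_flag (jobs : List (Int × Int)) (s : Int) (bs : List (List Int))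
    (st : Int × Int × Bool) (h : st.2.2 = false) :
    (bs.foldl (pvF jobs s) st).2.2 = false := by
  induction bs generalizing st with
  | nil => exact h
  | cons c t ih => exact ih _ (by rw [pvF_eq])

lemma pvFold_flag (jobs : List (Int × Int)) (s : Int) (bs : List (List Int)) :
    (pvFold jobs s bs).2.2 = bs.isEmpty := by
  cases bs with
  | nil => rfl
  | cons c t =>
    simp only [pvFold, List.foldl_cons, List.isEmpty_cons]
    exact pvF_flag jobs s t _ (by rw [pvF_eq])

-- completion time of batch c when appended after bs, as B computes it
def pvNext (jobs : List (Int × Int)) (s : Int) (bs : List (List Int)) (c : List Int) : Int :=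
  (pvFold jobs s bs).1 + (if bs.isEmpty then 0 else s) + pvP jobs c

lemma pvFold_append (jobs : List (Int × Int)) (s : Int) (bs : List (List Int)) (c : List Int) :
    pvFold jobs s (bs ++ [c]) =
      (pvNext jobs s bs c,
       (pvFold jobs s bs).2.1 + pvT (pvNext jobs s bs c) (pvDues jobs c),
       false) := by
  have h1 : pvFold jobs s (bs ++ [c]) = pvF jobs s (pvFold jobs s bs) c := by
    simp [pvFold, List.foldl_append]
  rw [h1, pvF_eq, pvFold_flag]
  cases hbs : bs.isEmpty
  · simp [pvNext, hbs]
  · have : bs = [] := by simpa using hbs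
    subst this
    simp [pvNext, pvFold]

lemma pvT_append (t : Int) (ds : List Int) (d : Int) :
    pvT t (ds ++ [d]) = pvT t ds + max 0 (t - d) := by
  simp [pvT]

lemma pvT_foldl (t : Int) (ds : List Int) :
    ds.foldl (fun a dd => a + max 0 (t - dd)) 0 = pvT t ds := by
  simp [pvT, PySem.List.foldl_add]

-- B's state mirrors A's: same batches and current batch, plus the cached committed
-- tardiness, committed end time, and processing sum / due dates of the current batch.
def pvInv (jobs : List (Int × Int)) (s : Int)
    (A : List (List Int) × List Int)
    (B : List (List Int) × List Int × Int × Int × Int × List Int) : Prop :=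
  B.1 = A.1 ∧ B.2.1 = A.2 ∧ B.2.2.1 = (pvFold jobs s A.1).2.1 ∧
  B.2.2.2.1 = (pvFold jobs s A.1).1 ∧ B.2.2.2.2.1 = pvP jobs A.2 ∧
  B.2.2.2.2.2 = pvDues jobs A.2

lemma pvSumA_eq (jobs : List (Int × Int)) (s : Int) (bs : List (List Int)) (cur : List Int)
    (x : Int × Int × Int) (hx : x.2 = pvJob jobs x.1) :
    compute_sumDj_from_batches jobs s (bs ++ [cur ++ [x.1]])
      = (pvFold jobs s bs).2.1
        + (pvT (pvNext jobs s bs cur + x.2.1) (pvDues jobs cur)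
           + max 0 (pvNext jobs s bs cur + x.2.1 - x.2.2)) := by
  rw [pvCompute_eq, pvFold_append]
  have hp : x.2.1 = (pvJob jobs x.1).1 := by rw [hx]
  have hnext : pvNext jobs s bs (cur ++ [x.1]) = pvNext jobs s bs cur + x.2.1 := by
    simp [pvNext, pvP, hp]; ring
  have hdues : pvDues jobs (cur ++ [x.1]) = pvDues jobs cur ++ [x.2.2] := by
    simp [pvDues, ← hx]
  simp only [hnext, hdues, pvT_append]

lemma pvSumB_eq (jobs : List (Int × Int)) (s : Int) (bs : List (List Int)) (cur : List Int)
    (x : Int × Int × Int) (hx : x.2 = pvJob jobs x.1) :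
    compute_sumDj_from_batches jobs s (bs ++ [cur, [x.1]])
      = (pvFold jobs s bs).2.1
        + (pvT (pvNext jobs s bs cur) (pvDues jobs cur)
           + max 0 (pvNext jobs s bs cur + s + x.2.1 - x.2.2)) := by
  have hsplit : bs ++ [cur, [x.1]] = (bs ++ [cur]) ++ [[x.1]] := by simp
  rw [pvCompute_eq, hsplit, pvFold_append, pvFold_append]
  have hp : x.2.1 = (pvJob jobs x.1).1 := by rw [hx]
  have hnext2 : pvNext jobs s (bs ++ [cur]) [x.1] = pvNext jobs s bs cur + s + x.2.1 := by
    simp [pvNext, pvFold_append, pvP, hp]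
  have hd1 : pvDues jobs [x.1] = [x.2.2] := by simp [pvDues, ← hx]
  simp only [hnext2, hd1, pvT, List.map_cons, List.map_nil, List.sum_cons, List.sum_nil]
  ring_nf

lemma pvMain (jobs : List (Int × Int)) (s : Int) (l : List (Int × Int × Int))
    (hl : ∀ x ∈ l, x.2 = pvJob jobs x.1)
    (A : List (List Int) × List Int)
    (B : List (List Int) × List Int × Int × Int × Int × List Int)
    (hInv : pvInv jobs s A B) :
    pvInv jobs s (l.foldl (heuristicStepA jobs s) A) (l.foldl (heuristicStepB s) B) := by
  induction l generalizing A B with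
  | nil => exact hInv
  | cons x l ih =>
    simp only [List.foldl_cons]
    apply ih (fun y hy => hl y (List.mem_cons_of_mem _ hy))
    obtain ⟨a1, a2⟩ := A
    obtain ⟨b1, b2, b3, b4, b5, b6⟩ := B
    obtain ⟨h1, h2, h3, h4, h5, h6⟩ := hInv
    simp only at h1 h2 h3 h4 h5 h6
    subst h1 h2 h3 h4 h5 h6
    have hx : x.2 = pvJob jobs x.1 := hl x List.mem_cons_self
    have hp : x.2.1 = (pvJob jobs x.1).1 := by rw [hx]
    have hdd : x.2.2 = (pvJob jobs x.1).2 := by rw [hx]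
    cases hE : b2.isEmpty with
    | true =>
      simp only [heuristicStepA, heuristicStepB, hE, if_true]
      exact ⟨rfl, rfl, rfl, rfl, by simp [pvP, hp], by simp [pvDues, hdd]⟩
    | false =>
      have hcond : (compute_sumDj_from_batches jobs s (b1 ++ [b2 ++ [x.1]])
            ≤ compute_sumDj_from_batches jobs s (b1 ++ [b2, [x.1]]))
          ↔ ((pvDues jobs b2).foldl
                (fun a dd => a + max 0 ((pvFold jobs s b1).1 + (if b1.isEmpty then 0 else s) + pvP jobs b2 + x.2.1 - dd)) 0
                + max 0 ((pvFold jobs s b1).1 + (if b1.isEmpty then 0 else s) + pvP jobs b2 + x.2.1 - x.2.2)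
              ≤ (pvDues jobs b2).foldl
                (fun a dd => a + max 0 ((pvFold jobs s b1).1 + (if b1.isEmpty then 0 else s) + pvP jobs b2 - dd)) 0
                + max 0 ((pvFold jobs s b1).1 + (if b1.isEmpty then 0 else s) + pvP jobs b2 + s + x.2.1 - x.2.2)) := by
        rw [pvSumA_eq jobs s b1 b2 x hx, pvSumB_eq jobs s b1 b2 x hx, pvT_foldl, pvT_foldl]
        have hn : pvNext jobs s b1 b2
            = (pvFold jobs s b1).1 + (if b1.isEmpty then 0 else s) + pvP jobs b2 := rfl
        rw [← hn]
        omega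
      by_cases hd : compute_sumDj_from_batches jobs s (b1 ++ [b2 ++ [x.1]])
          ≤ compute_sumDj_from_batches jobs s (b1 ++ [b2, [x.1]])
      · simp only [heuristicStepA, heuristicStepB, hE, Bool.false_eq_true, if_false,
          if_pos hd, if_pos (hcond.mp hd)]
        exact ⟨rfl, rfl, rfl, rfl, by simp [pvP, hp], by simp [pvDues, hdd]⟩
      · simp only [heuristicStepA, heuristicStepB, hE, Bool.false_eq_true, if_false,
          if_neg hd, if_neg (fun h => hd (hcond.mpr h))]
        refine ⟨rfl, rfl, ?_, ?_, by simp [pvP, hp], by simp [pvDues, hdd]⟩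
        · rw [pvFold_append, pvT_foldl]; simp [pvNext]
        · rw [pvFold_append]; simp [pvNext]

lemma pvIndexed_mem (jobs : List (Int × Int)) (x : Int × Int × Int)
    (hx : x ∈ PySem.List.sorted ((PySem.List.pyRange 0 (jobs.length : Int) 1).map (fun i =>
      (i + 1, (PySem.List.pyGetD jobs i ((0 : Int), (0 : Int))).1, (PySem.List.pyGetD jobs i ((0 : Int), (0 : Int))).2)))
      (fun x => x.2.2) false) :
    x.2 = pvJob jobs x.1 := by
  rw [PySem.List.mem_sorted] at hx
  obtain ⟨i, hi, rfl⟩ := List.mem_map.mp hx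
  simp [pvJob]

-- ===== VERDICT (by name: the statement is the Claim_ definition above) =====
theorem heuristic_solver_spec : Claim_equal_heuristic_solver := by
  intro jobs s _
  unfold Spec_heuristic_solver heuristic_solver heuristic_solver_alt
  simp only []
  obtain ⟨h1, h2, h3, h4, h5, h6⟩ :=
    pvMain jobs s _ (fun x hx => pvIndexed_mem jobs x hx) ([], []) ([], [], 0, 0, 0, [])
      ⟨rfl, rfl, rfl, rfl, rfl, rfl⟩
  rw [h1, h2, h3, h4, h5, h6]
  by_cases hc : (((PySem.List.sorted ((PySem.List.pyRange 0 (jobs.length : Int) 1).map (fun i =>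
      (i + 1, (PySem.List.pyGetD jobs i ((0 : Int), (0 : Int))).1, (PySem.List.pyGetD jobs i ((0 : Int), (0 : Int))).2)))
      (fun x => x.2.2) false).foldl (heuristicStepA jobs s) ([], [])).2).isEmpty
  · rw [if_pos hc, if_pos hc, pvCompute_eq]
  · rw [if_neg hc, if_neg hc, pvCompute_eq, pvFold_append, pvT_foldl]
    simp [pvNext]
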